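-- pv_equiv track=rewrite | github.com/Samir70/codecademy | Python3/challenges/strings.py | substring_between_letters
-- ===== SOURCE A (Python) =====
-- def substring_between_letters(str, start, end):
--     i = 0
--     while i < len(str) and str[i] != start:
--         i += 1
--     out = ""
--     i += 1
--     while i < len(str) and str[i] != end:
--         out += str[i]
--         i += 1
--     return out if i < len(str) else str
-- ===== SOURCE B (Python) =====
-- def substring_between_letters(str, start, end):
--     chars = list(str)
--     if start not in chars:
--         return str
--     rest = chars[chars.index(start) + 1:]
--     if end not in rest:
--         return str
--     return "".join(rest[:rest.index(end)])
-- ===== Notes on version B (the rewrite author's own statement) =====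
-- stated objective: idiomatic
-- what changed: Replaces A's two index-tracking, character-accumulating while loops with membership tests plus list.index and a slice/join (index-then-slice decomposition); both missing-marker cases fall out of the membership tests instead of a final index comparison.
import Mathlib
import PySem

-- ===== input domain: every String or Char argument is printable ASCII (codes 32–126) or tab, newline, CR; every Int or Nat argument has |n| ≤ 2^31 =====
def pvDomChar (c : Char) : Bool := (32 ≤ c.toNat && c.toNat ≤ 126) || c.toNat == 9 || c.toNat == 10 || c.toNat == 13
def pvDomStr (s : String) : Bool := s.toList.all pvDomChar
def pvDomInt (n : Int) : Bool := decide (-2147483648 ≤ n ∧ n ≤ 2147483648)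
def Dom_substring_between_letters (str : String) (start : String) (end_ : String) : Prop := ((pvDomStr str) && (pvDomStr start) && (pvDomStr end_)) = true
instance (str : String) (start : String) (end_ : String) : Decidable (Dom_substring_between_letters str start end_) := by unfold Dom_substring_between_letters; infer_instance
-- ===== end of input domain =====

-- B replaces A's two char-accumulating while loops by membership tests, list.index and a slice
-- (an index-then-slice decomposition); objective: more idiomatic, same asymptotic cost.

-- ===== PORT A =====
-- first while loop: advance i while i < len(str) and str[i] != start; returns the final i
def pvA_loop1 : List Char → String → Nat → Nat
  | [], _, i => i
  | c :: rest, start, i => if String.ofList [c] ≠ start then pvA_loop1 rest start (i + 1) else i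

-- second while loop: out += str[i] while i < len(str) and str[i] != end; returns (out, final i)
def pvA_loop2 : List Char → String → Nat → List Char → List Char × Nat
  | [], _, i, out => (out, i)
  | c :: rest, e, i, out => if String.ofList [c] ≠ e then pvA_loop2 rest e (i + 1) (out ++ [c]) else (out, i)

def substring_between_letters (str : String) (start : String) (end_ : String) : String :=
  let cs := str.toList
  let i1 := pvA_loop1 cs start 0
  -- i += 1; the second loop runs from index i1 + 1, i.e. over cs.drop (i1 + 1)
  let r := pvA_loop2 (cs.drop (i1 + 1)) end_ (i1 + 1) []
  if r.2 < cs.length then String.ofList r.1 else str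

-- ===== PORT B =====
def substring_between_letters_alt (str : String) (start : String) (end_ : String) : String :=
  let chars := str.toList.map (fun c => String.ofList [c])   -- chars = list(str)
  if chars.contains start = false then str                   -- if start not in chars: return str
  else
    -- rest = chars[chars.index(start) + 1:]  (index exact here: membership was just checked, .getD 0 unreachable)
    let rest := chars.drop (((PySem.List.index? chars start).getD 0) + 1)
    if rest.contains end_ = false then str                   -- if end not in rest: return str
    else
      -- "".join(rest[:rest.index(end)])  (index exact here: membership was just checked)
      PySem.Str.join "" (rest.take ((PySem.List.index? rest end_).getD 0))

-- ===== PRECONDITION & SPEC =====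
def Spec_substring_between_letters (str : String) (start : String) (end_ : String) (out : String) : Prop := out = substring_between_letters_alt str start end_
instance (str : String) (start : String) (end_ : String) (out : String) : Decidable (Spec_substring_between_letters str start end_ out) := by unfold Spec_substring_between_letters; infer_instance

-- ===== CLAIM (what is proved, stated in full; the proofs are below) =====
def Claim_equal_substring_between_letters : Prop := ∀ (str : String) (start : String) (end_ : String), Dom_substring_between_letters str start end_ → Spec_substring_between_letters str start end_ (substring_between_letters str start end_)

-- ===== LEMMAS AND PROOFS =====

theorem pvA_loop1_eq (start : String) : ∀ (cs : List Char) (i : Nat),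
    pvA_loop1 cs start i = i + cs.findIdx (fun c => String.ofList [c] == start)
  | [], i => by simp [pvA_loop1]
  | c :: rest, i => by
    by_cases h : String.ofList [c] = start
    · simp [pvA_loop1, h, List.findIdx_cons]
    · have hb : (String.ofList [c] == start) = false := by simp [h]
      simp [pvA_loop1, h, List.findIdx_cons, hb, pvA_loop1_eq start rest (i + 1)]
      omega

theorem pvA_loop2_eq (e : String) : ∀ (cs : List Char) (i : Nat) (out : List Char),
    pvA_loop2 cs e i out =
      (out ++ cs.take (cs.findIdx (fun c => String.ofList [c] == e)),
       i + cs.findIdx (fun c => String.ofList [c] == e))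
  | [], i, out => by simp [pvA_loop2]
  | c :: rest, i, out => by
    by_cases h : String.ofList [c] = e
    · simp [pvA_loop2, h, List.findIdx_cons]
    · have hb : (String.ofList [c] == e) = false := by simp [h]
      simp [pvA_loop2, h, List.findIdx_cons, hb, pvA_loop2_eq e rest (i + 1) (out ++ [c])]
      omega

theorem findIdx?_eq_some_findIdx {α : Type} {p : α → Bool} {l : List α}
    (h : l.findIdx p < l.length) : l.findIdx? p = some (l.findIdx p) := by
  rcases hcase : l.findIdx? p with _ | i
  · exfalso
    have h2 := List.findIdx_eq_getD_findIdx? (p := p) (xs := l)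
    rw [hcase] at h2
    simp only [Option.getD_none] at h2
    omega
  · have h2 := List.findIdx_eq_getD_findIdx? (p := p) (xs := l)
    rw [hcase] at h2
    simp only [Option.getD_some] at h2
    rw [h2]

-- chars.index(v) on chars = list(str): the first index with str[i] == v
theorem index?_map_singleton (cs : List Char) (v : String)
    (h : cs.findIdx (fun c => String.ofList [c] == v) < cs.length) :
    PySem.List.index? (cs.map (fun c => String.ofList [c])) v
      = some (cs.findIdx (fun c => String.ofList [c] == v)) := by
  rw [PySem.List.index?_eq_idxOf?]
  simp only [List.idxOf?, List.findIdx?_map]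
  exact findIdx?_eq_some_findIdx h

theorem contains_map_singleton (cs : List Char) (v : String) :
    (cs.map (fun c => String.ofList [c])).contains v = true
      ↔ cs.findIdx (fun c => String.ofList [c] == v) < cs.length := by
  rw [List.contains_iff_mem, List.findIdx_lt_length]
  simp [List.mem_map]

theorem join_nil_map_singleton (l : List Char) :
    PySem.Str.join "" (l.map (fun c => String.ofList [c])) = String.ofList l := by
  apply String.toList_inj.mp
  rw [PySem.Str.toList_join]
  simp only [List.map_map]
  have hc : (String.toList ∘ fun c => String.ofList [c]) = fun c => [c] := by
    funext c; simp
  rw [hc]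
  simp [PySem.Chars.join_nil_singletons]

-- ===== VERDICT (by name: the statement is the Claim_ definition above) =====
theorem substring_between_letters_spec : Claim_equal_substring_between_letters := by
  intro str start end_ _
  unfold Spec_substring_between_letters
  simp only [substring_between_letters, substring_between_letters_alt]
  set cs := str.toList with hcs
  set n := cs.length with hn
  set j := cs.findIdx (fun c => String.ofList [c] == start) with hj
  have hjle : j ≤ n := List.findIdx_le_length
  rw [pvA_loop1_eq]
  simp only [Nat.zero_add, ← hj]
  by_cases hmem : (cs.map (fun c => String.ofList [c])).contains start = true
  · -- start found at index j < n
    have hjlt : j < n := (contains_map_singleton cs start).mp hmem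
    simp only [hmem, Bool.true_eq_false, if_false]
    rw [index?_map_singleton cs start (hn ▸ hjlt)]
    simp only [Option.getD_some, ← List.map_drop]
    set d := cs.drop (j + 1) with hd
    have hdlen : d.length = n - (j + 1) := by simp [hd, hn]
    set k := d.findIdx (fun c => String.ofList [c] == end_) with hk
    have hkle : k ≤ d.length := List.findIdx_le_length
    rw [pvA_loop2_eq]
    simp only [List.nil_append, ← hk]
    by_cases hmem2 : (d.map (fun c => String.ofList [c])).contains end_ = true
    · -- end found in the rest: A returns out, B the matching slice
      have hklt : k < d.length := (contains_map_singleton d end_).mp hmem2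
      have hi2 : j + 1 + k < n := by omega
      simp only [hmem2, Bool.true_eq_false, if_false]
      rw [if_pos hi2, index?_map_singleton d end_ hklt]
      simp only [Option.getD_some, ← List.map_take]
      rw [join_nil_map_singleton]
    · -- end not in the rest: both return str
      have hkeq : k = d.length := by
        rcases Nat.lt_or_eq_of_le hkle with h | h
        · exact absurd ((contains_map_singleton d end_).mpr h) hmem2
        · exact h
      have hnot : ¬ (j + 1 + k < n) := by omega
      rw [if_neg hnot]
      simp only [Bool.not_eq_true] at hmem2
      rw [hmem2, if_pos rfl]
  · -- start not found: both return str
    have hjeq : j = n := by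
      rcases Nat.lt_or_eq_of_le hjle with h | h
      · exact absurd ((contains_map_singleton cs start).mpr h) hmem
      · exact h
    have hdrop : cs.drop (j + 1) = [] := by
      apply List.drop_eq_nil_of_le; omega
    simp only [Bool.not_eq_true] at hmem
    rw [hdrop, hmem, if_pos rfl]
    simp [pvA_loop2]
    omega
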